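-- pv_equiv track=rewrite | github.com/TDTU-K25/discrete-structures | Lab/version1/Lab04/Lab04.py | ex3_d
-- ===== SOURCE A (Python) =====
-- import itertools
--
-- truths = list(itertools.product([0, 1], repeat=3))
--
-- def implication(a, b):
--     if (a == True and b == False):
--         return False
--     return True
--
-- def ex3_d(truths):
--     truth_table_notP_implies_q_or_r = []
--     truth_table_not_p_implies_p_and_r = []
--
--     for item in truths:
--         if item[0] == 1:
--             a = True
--         else:
--             a = False
--
--         if item[1] == 1:
--             b = True
--         else:
--             b = False
--
--         if item[2] == 1:
--             c = True
--         else: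
--             c = False
--
--         truth_table_notP_implies_q_or_r.append(implication(not (a), b or c))
--         truth_table_not_p_implies_p_and_r.append(not (implication(a, a)) and c)
--
--     isEquivalent = True
--     for i in range(len(truth_table_notP_implies_q_or_r)):
--         if (truth_table_notP_implies_q_or_r[i] != truth_table_not_p_implies_p_and_r[i]):
--             isEquivalent = False
--             break
--
--     return isEquivalent
-- ===== SOURCE B (Python) =====
-- def implication(a, b):
--     if (a == True and b == False):
--         return False
--     return True
--
-- def ex3_d(truths):
--     # single streaming pass with early exit: no truth-table lists are built
--     for item in truths:
--         a = item[0] == 1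
--         b = item[1] == 1
--         c = item[2] == 1
--         left = implication(not a, b or c)
--         right = not implication(a, a) and c
--         if left != right:
--             return False
--     return True
-- ===== Notes on version B (the rewrite author's own statement) =====
-- stated objective: simpler
-- what changed: Replaces building two full truth-table lists plus a second index-scanning compare loop with a single streaming pass that evaluates both formulas per row and returns False at the first mismatch.
import Mathlib
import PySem

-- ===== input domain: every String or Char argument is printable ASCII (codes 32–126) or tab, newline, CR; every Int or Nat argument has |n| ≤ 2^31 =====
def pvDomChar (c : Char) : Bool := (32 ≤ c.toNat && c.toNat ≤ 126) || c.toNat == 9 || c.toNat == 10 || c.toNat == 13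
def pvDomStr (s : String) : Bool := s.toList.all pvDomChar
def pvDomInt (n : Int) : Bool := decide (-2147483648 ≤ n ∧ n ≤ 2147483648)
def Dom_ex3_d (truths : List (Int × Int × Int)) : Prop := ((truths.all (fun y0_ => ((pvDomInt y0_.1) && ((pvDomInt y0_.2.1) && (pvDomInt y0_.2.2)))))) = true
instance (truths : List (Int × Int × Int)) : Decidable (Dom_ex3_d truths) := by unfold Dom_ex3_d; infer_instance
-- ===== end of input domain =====

-- B replaces A's build-two-truth-table-lists-then-scan decomposition by one streaming pass with early exit (objective: simpler).

-- ===== PORT A =====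

-- port of helper `implication`
def pvImplication (a b : Bool) : Bool :=
  if a = true ∧ b = false then false else true

-- the index-compare loop `for i in range(len(t1)): if t1[i] != t2[i]: isEquivalent = False; break`
-- (the two lists always have equal length, so paired structural recursion is exact)
def pvCmpLoop : List Bool → List Bool → Bool
  | x :: xs, y :: ys => if x ≠ y then false else pvCmpLoop xs ys
  | _, _ => true

def ex3_d (truths : List (Int × Int × Int)) : Bool :=
  let tables := truths.foldl (fun (acc : List Bool × List Bool) item =>
    let a : Bool := if item.1 = 1 then true else false
    let b : Bool := if item.2.1 = 1 then true else false
    let c : Bool := if item.2.2 = 1 then true else false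
    (acc.1 ++ [pvImplication (!a) (b || c)],
     acc.2 ++ [(!pvImplication a a) && c])) ([], [])
  pvCmpLoop tables.1 tables.2

-- ===== PORT B =====
def ex3_d_alt : List (Int × Int × Int) → Bool
  | [] => true
  | item :: rest =>
    let a : Bool := item.1 = 1
    let b : Bool := item.2.1 = 1
    let c : Bool := item.2.2 = 1
    let left := pvImplication (!a) (b || c)
    let right := (!pvImplication a a) && c
    if left ≠ right then false else ex3_d_alt rest

-- ===== PRECONDITION & SPEC =====
def Spec_ex3_d (truths : List (Int × Int × Int)) (out : Bool) : Prop := out = ex3_d_alt truths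
instance (truths : List (Int × Int × Int)) (out : Bool) : Decidable (Spec_ex3_d truths out) := by unfold Spec_ex3_d; infer_instance

-- ===== CLAIM (what is proved, stated in full; the proofs are below) =====
def Claim_equal_ex3_d : Prop := ∀ (truths : List (Int × Int × Int)), Dom_ex3_d truths → Spec_ex3_d truths (ex3_d truths)

-- ===== LEMMAS AND PROOFS =====

def pvRowL (item : Int × Int × Int) : Bool :=
  pvImplication (!(if item.1 = 1 then true else false))
    ((if item.2.1 = 1 then true else false) || (if item.2.2 = 1 then true else false))

def pvRowR (item : Int × Int × Int) : Bool :=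
  (!pvImplication (if item.1 = 1 then true else false) (if item.1 = 1 then true else false))
    && (if item.2.2 = 1 then true else false)

-- A's fold builds exactly the two mapped truth tables, appended after the accumulator
theorem pv_fold_map (ts : List (Int × Int × Int)) (acc1 acc2 : List Bool) :
    ts.foldl (fun (acc : List Bool × List Bool) item =>
      let a : Bool := if item.1 = 1 then true else false
      let b : Bool := if item.2.1 = 1 then true else false
      let c : Bool := if item.2.2 = 1 then true else false
      (acc.1 ++ [pvImplication (!a) (b || c)],
       acc.2 ++ [(!pvImplication a a) && c])) (acc1, acc2)
    = (acc1 ++ ts.map pvRowL, acc2 ++ ts.map pvRowR) := by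
  induction ts generalizing acc1 acc2 with
  | nil => simp
  | cons x xs ih =>
    simp only [List.foldl_cons, List.map_cons]
    rw [ih]
    simp [pvRowL, pvRowR]

theorem pv_cmp_map (ts : List (Int × Int × Int)) :
    pvCmpLoop (ts.map pvRowL) (ts.map pvRowR) = ex3_d_alt ts := by
  induction ts with
  | nil => rfl
  | cons x xs ih =>
    simp only [List.map_cons, pvCmpLoop, ex3_d_alt, ih]
    rfl

-- ===== VERDICT (by name: the statement is the Claim_ definition above) =====
theorem ex3_d_spec : Claim_equal_ex3_d := by
  intro truths _
  unfold Spec_ex3_d ex3_d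
  rw [pv_fold_map]
  simpa using pv_cmp_map truths
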